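-- pv_equiv track=rewrite | github.com/soumilk91/DS-Algo-In-Python | IK/Graphs/shortest_distance_to_a_guard.py | find_shortest_distance_from_a_guard
-- ===== SOURCE A (Python) =====
-- from collections import deque
--
-- def find_shortest_distance_from_a_guard(grid):
--     """
--     Args:
--      grid(list_list_char)
--     Returns:
--      list_list_int32
--     """
--     if not grid:
--         return grid
--
--     ROWS, COLS = len(grid), len(grid[0])
--     queue = deque()
--     # Initialize the distance matrix with infinity for open spaces and -1 for walls
--     distance = [[-1 if grid[r][c] == 'W' else float('inf') for c in range(COLS)] for r in range(ROWS)]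
--
--     # Enqueue all guards and set their distances to 0
--     for row in range(ROWS):
--         for col in range(COLS):
--             if grid[row][col] == "G":
--                 queue.append((row, col))
--                 distance[row][col] = 0
--
--     # Directions for up, down, left, right
--     directions = [(-1, 0), (1, 0), (0, 1), (0, -1)]
--
--     # Perform BFS
--     while queue:
--         row, col = queue.popleft()
--         currDistance = distance[row][col]
--
--         for dr, dc in directions:
--             newRow, newCol = row + dr, col + dc
--             if 0 <= newRow < ROWS and 0 <= newCol < COLS and grid[newRow][newCol] == "O":
--                 # If the current path offers a shorter distance, update it
--                 if distance[newRow][newCol] > currDistance + 1: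
--                     distance[newRow][newCol] = currDistance + 1
--                     queue.append((newRow, newCol))
--
--     # Replace 'inf' with -1 for cells that can't reach a guard
--     for r in range(ROWS):
--         for c in range(COLS):
--             if distance[r][c] == float('inf'):
--                 distance[r][c] = -1
--
--     return distance
-- ===== SOURCE B (Python) =====
-- def find_shortest_distance_from_a_guard(grid):
--     """Bellman-Ford-style relaxation: no queue at all; repeatedly sweep the whole
--     grid, lowering each open cell to 1 + its best usable neighbour, until a full
--     sweep changes nothing."""
--     if not grid:
--         return grid
--     rows, cols = len(grid), len(grid[0])
--     dist = [[0 if grid[r][c] == 'G' else (-1 if grid[r][c] == 'W' else None)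
--              for c in range(cols)] for r in range(rows)]
--     changed = True
--     while changed:
--         changed = False
--         for r in range(rows):
--             for c in range(cols):
--                 if grid[r][c] == 'O':
--                     for nr, nc in ((r - 1, c), (r + 1, c), (r, c + 1), (r, c - 1)):
--                         if 0 <= nr < rows and 0 <= nc < cols and grid[nr][nc] in ('G', 'O'):
--                             d = dist[nr][nc]
--                             if d is not None and (dist[r][c] is None or d + 1 < dist[r][c]):
--                                 dist[r][c] = d + 1
--                                 changed = True
--     return [[-1 if v is None else v for v in row] for row in dist]
-- ===== Notes on version B (the rewrite author's own statement) =====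
-- stated objective: alternative
-- what changed: Replaces the deque-driven multi-source BFS by a queue-free Bellman-Ford-style relaxation: repeated whole-grid sweeps that lower each open cell to 1 + its best guard/open neighbour until a sweep changes nothing, with None as the unvisited sentinel instead of float('inf') and no final cleanup pass.
import Mathlib
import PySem

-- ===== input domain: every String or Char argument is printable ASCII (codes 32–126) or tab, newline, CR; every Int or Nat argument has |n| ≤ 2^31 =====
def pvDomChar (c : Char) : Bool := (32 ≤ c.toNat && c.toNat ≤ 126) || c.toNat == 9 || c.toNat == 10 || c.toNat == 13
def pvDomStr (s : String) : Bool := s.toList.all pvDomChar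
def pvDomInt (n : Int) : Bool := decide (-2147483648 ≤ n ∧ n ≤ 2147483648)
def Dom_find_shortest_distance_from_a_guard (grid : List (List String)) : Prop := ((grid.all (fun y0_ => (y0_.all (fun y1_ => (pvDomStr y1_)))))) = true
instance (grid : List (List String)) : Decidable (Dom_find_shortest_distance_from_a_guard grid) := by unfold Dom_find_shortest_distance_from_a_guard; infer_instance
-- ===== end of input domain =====

-- B replaces A's deque-driven multi-source BFS by a queue-free Bellman-Ford-style
-- relaxation (repeated whole-grid sweeps until a sweep changes nothing); same return
-- value on every input on which the Python A returns.

-- ===== PORT A =====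
-- grid[r][c] (all uses are guarded in range; default never read on admitted inputs)
def pvCell (grid : List (List String)) (r c : Int) : String :=
  (PySem.List.pyGet? ((PySem.List.pyGet? grid r).getD []) c).getD ""

-- m[r][c] = v (all uses are guarded in range, r,c ≥ 0)
def pvMSet {α : Type} (m : List (List α)) (r c : Int) (v : α) : List (List α) :=
  m.modify r.toNat (fun row => row.set c.toNat v)

-- distance[r][c] for A's matrix, whose entries are ints or float('inf'): none = inf
def pvGetO (m : List (List (Option Int))) (r c : Int) : Option Int :=
  (PySem.List.pyGet? ((PySem.List.pyGet? m r).getD []) c).getD none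

def pvDirections : List (Int × Int) := [(-1, 0), (1, 0), (0, 1), (0, -1)]

-- x + 1 on {int, float('inf')} (exact: inf + 1 = inf)
def pvInfAdd1 : Option Int → Option Int
  | none => none
  | some n => some (n + 1)

-- v > w on {int, float('inf')} (exact: inf > n, ¬(inf > inf), ¬(n > inf))
def pvInfGT : Option Int → Option Int → Bool
  | none, none => false
  | none, some _ => true
  | some _, none => false
  | some a, some b => decide (b < a)

-- the body of A's 'for dr, dc in directions' loop
def pvRelaxA (grid : List (List String)) (ROWS COLS row col : Int) (curr : Option Int)
    (s : List (List (Option Int)) × List (Int × Int)) (dir : Int × Int) :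
    List (List (Option Int)) × List (Int × Int) :=
  let newRow := row + dir.1
  let newCol := col + dir.2
  if (0 ≤ newRow ∧ newRow < ROWS ∧ 0 ≤ newCol ∧ newCol < COLS) ∧ pvCell grid newRow newCol = "O" then
    if pvInfGT (pvGetO s.1 newRow newCol) (pvInfAdd1 curr) then
      (pvMSet s.1 newRow newCol (pvInfAdd1 curr), s.2 ++ [(newRow, newCol)])
    else s
  else s

-- A's 'while queue' loop; fuel only makes the recursion structural, the top-level fuel is
-- large enough that the exhaustion branch is never taken (established in the proofs below)
def pvBfsA (grid : List (List String)) (ROWS COLS : Int) :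
    Nat → List (List (Option Int)) → List (Int × Int) → List (List (Option Int))
  | _, dist, [] => dist
  | 0, dist, _ :: _ => dist
  | fuel + 1, dist, (row, col) :: rest =>
    let curr := pvGetO dist row col
    let s := pvDirections.foldl (pvRelaxA grid ROWS COLS row col curr) (dist, rest)
    pvBfsA grid ROWS COLS fuel s.1 s.2

-- distance = [[-1 if grid[r][c]=='W' else float('inf') …]]
def pvDist0A (grid : List (List String)) : List (List (Option Int)) :=
  (PySem.List.pyRange 0 (grid.length : Int) 1).map (fun r =>
    (PySem.List.pyRange 0 ((grid.headD []).length : Int) 1).map (fun c =>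
      if pvCell grid r c = "W" then some (-1 : Int) else none))

-- the guard-enqueueing double loop: state (distance, queue)
def pvInitA (grid : List (List String)) :
    List (List (Option Int)) × List (Int × Int) :=
  (PySem.List.pyRange 0 (grid.length : Int) 1).foldl (fun s row =>
    (PySem.List.pyRange 0 ((grid.headD []).length : Int) 1).foldl (fun s col =>
      if pvCell grid row col = "G" then (pvMSet s.1 row col (some 0), s.2 ++ [(row, col)]) else s) s)
    (pvDist0A grid, ([] : List (Int × Int)))

def find_shortest_distance_from_a_guard (grid : List (List String)) : List (List Int) :=
  if grid = [] then [] else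
    (pvBfsA grid (grid.length : Int) ((grid.headD []).length : Int)
        (grid.length * (grid.headD []).length * (grid.length * (grid.headD []).length + 3) + 1)
        (pvInitA grid).1 (pvInitA grid).2).map
      (List.map (fun v => match v with | none => (-1 : Int) | some x => x))

-- ===== PORT B =====
-- dist = [[0 if 'G' else (-1 if 'W' else None) …]]
def pvInitB (grid : List (List String)) : List (List (Option Int)) :=
  (PySem.List.pyRange 0 (grid.length : Int) 1).map (fun r =>
    (PySem.List.pyRange 0 ((grid.headD []).length : Int) 1).map (fun c =>
      if pvCell grid r c = "G" then some (0 : Int)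
      else if pvCell grid r c = "W" then some (-1 : Int) else none))

-- one neighbour test of B's innermost loop: relax dist[r][c] through neighbour nb
def pvUpdB (grid : List (List String)) (R C : Int) (r c : Int)
    (s : List (List (Option Int)) × Bool) (nb : Int × Int) :
    List (List (Option Int)) × Bool :=
  if (0 ≤ nb.1 ∧ nb.1 < R ∧ 0 ≤ nb.2 ∧ nb.2 < C) ∧
      (pvCell grid nb.1 nb.2 = "G" ∨ pvCell grid nb.1 nb.2 = "O") then
    match pvGetO s.1 nb.1 nb.2 with
    | none => s
    | some d =>
      if (match pvGetO s.1 r c with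
          | none => true
          | some cur => decide (d + 1 < cur)) = true then
        (pvMSet s.1 r c (some (d + 1)), true)
      else s
  else s

-- one full sweep over the grid; the Bool is Python's 'changed' flag
def pvSweepB (grid : List (List String)) (R C : Int) (m : List (List (Option Int))) :
    List (List (Option Int)) × Bool :=
  (PySem.List.pyRange 0 R 1).foldl (fun s r =>
    (PySem.List.pyRange 0 C 1).foldl (fun s c =>
      if pvCell grid r c = "O" then
        [(r - 1, c), (r + 1, c), (r, c + 1), (r, c - 1)].foldl (pvUpdB grid R C r c) s
      else s) s) (m, false)

-- B's 'while changed' loop; fuel only makes the recursion structural, the top-level fuel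
-- is large enough that the exhaustion branch is never taken (established below)
def pvLoopB (grid : List (List String)) (R C : Int) :
    Nat → List (List (Option Int)) → List (List (Option Int))
  | 0, m => m
  | fuel + 1, m =>
    let s := pvSweepB grid R C m
    if s.2 then pvLoopB grid R C fuel s.1 else s.1

def find_shortest_distance_from_a_guard_alt (grid : List (List String)) : List (List Int) :=
  if grid = [] then [] else
    (pvLoopB grid (grid.length : Int) ((grid.headD []).length : Int)
        (grid.length * (grid.headD []).length * (grid.length * (grid.headD []).length + 2) + 2)
        (pvInitB grid)).map (List.map (fun v => v.getD (-1)))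

-- ===== PRECONDITION & SPEC =====
-- Pre_ excludes ragged grids in which some row is shorter than the first row: on those the
-- Python A raises IndexError while building the distance matrix (B raises identically).
def Pre_find_shortest_distance_from_a_guard (grid : List (List String)) : Prop :=
  ∀ row ∈ grid, (grid.headD []).length ≤ row.length
instance (grid : List (List String)) : Decidable (Pre_find_shortest_distance_from_a_guard grid) := by
  unfold Pre_find_shortest_distance_from_a_guard; infer_instance

def pvWitness_find_shortest_distance_from_a_guard : List (List String) :=
  [["G", "O", "O"], ["W", "W", "O"], ["O", "O", "O"]]

def Spec_find_shortest_distance_from_a_guard (grid : List (List String)) (out : List (List Int)) : Prop :=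
  out = find_shortest_distance_from_a_guard_alt grid
instance (grid : List (List String)) (out : List (List Int)) : Decidable (Spec_find_shortest_distance_from_a_guard grid out) := by
  unfold Spec_find_shortest_distance_from_a_guard; infer_instance

-- ===== CLAIM (what is proved, stated in full; the proofs are below) =====
def Claim_equal_find_shortest_distance_from_a_guard : Prop := ∀ (grid : List (List String)), Dom_find_shortest_distance_from_a_guard grid → Pre_find_shortest_distance_from_a_guard grid → Spec_find_shortest_distance_from_a_guard grid (find_shortest_distance_from_a_guard grid)

-- ===== LEMMAS AND PROOFS =====

-- shape of a distance matrix
def ShapeM (m : List (List (Option Int))) (Rn Cn : Nat) : Prop :=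
  m.length = Rn ∧ ∀ row ∈ m, row.length = Cn

-- number of 'inf'/None entries
def cNone (m : List (List (Option Int))) : Nat :=
  (m.map (fun row => row.countP (fun v => v.isNone))).sum

-- order on {int, ∞}: none is the top element
def leO : Option Int → Option Int → Prop
  | _, none => True
  | none, some _ => False
  | some a, some b => a ≤ b

-- pointwise order on matrices (at nonnegative coordinates)
def PLe (m1 m2 : List (List (Option Int))) : Prop :=
  ∀ i j : Int, 0 ≤ i → 0 ≤ j → leO (pvGetO m1 i j) (pvGetO m2 i j)

-- X is a fixpoint of the relaxation: no open cell sits above 1 + a usable neighbour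
def FixM (grid : List (List String)) (R C : Int) (X : List (List (Option Int))) : Prop :=
  ∀ r c : Int, 0 ≤ r → r < R → 0 ≤ c → c < C → pvCell grid r c = "O" →
    ∀ dir ∈ pvDirections, 0 ≤ r + dir.1 → r + dir.1 < R → 0 ≤ c + dir.2 → c + dir.2 < C →
      (pvCell grid (r + dir.1) (c + dir.2) = "G" ∨ pvCell grid (r + dir.1) (c + dir.2) = "O") →
      leO (pvGetO X r c) (pvInfAdd1 (pvGetO X (r + dir.1) (c + dir.2)))

-- value bounds: walls are -1, guards are 0, other finite values are small
def VB (grid : List (List String)) (Rn Cn : Nat) (m : List (List (Option Int))) : Prop :=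
  ∀ r c : Int, 0 ≤ r → r < (Rn : Int) → 0 ≤ c → c < (Cn : Int) →
    (pvCell grid r c = "W" → pvGetO m r c = some (-1)) ∧
    (pvCell grid r c = "G" → pvGetO m r c = some 0) ∧
    (pvCell grid r c ≠ "W" → pvCell grid r c ≠ "G" →
      (pvGetO m r c = none ∨
        ∃ v : Int, pvGetO m r c = some v ∧ 0 ≤ v ∧ v + (cNone m : Int) ≤ ((Rn * Cn : Nat) : Int)))

-- queue invariants of A's BFS
def Q1 (grid : List (List String)) (R C : Int) (Q : List (Int × Int)) : Prop :=
  ∀ p ∈ Q, (0 ≤ p.1 ∧ p.1 < R ∧ 0 ≤ p.2 ∧ p.2 < C) ∧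
    (pvCell grid p.1 p.2 = "G" ∨ pvCell grid p.1 p.2 = "O")

def Q2 (grid : List (List String)) (R C : Int) (m : List (List (Option Int)))
    (Q : List (Int × Int)) : Prop :=
  ∀ b1 b2 : Int, 0 ≤ b1 → b1 < R → 0 ≤ b2 → b2 < C →
    (pvCell grid b1 b2 = "G" ∨ pvCell grid b1 b2 = "O") →
    ∀ v : Int, pvGetO m b1 b2 = some v → (b1, b2) ∉ Q →
    ∀ dir ∈ pvDirections, 0 ≤ b1 + dir.1 → b1 + dir.1 < R → 0 ≤ b2 + dir.2 → b2 + dir.2 < C →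
      pvCell grid (b1 + dir.1) (b2 + dir.2) = "O" →
      leO (pvGetO m (b1 + dir.1) (b2 + dir.2)) (some (v + 1))

-- potential of one entry / of the whole matrix (termination measure)
def psi (N : Nat) : Option Int → Nat
  | none => N + 2
  | some v => (v + 1).toNat

def phiM (N : Nat) (m : List (List (Option Int))) : Nat :=
  (m.map (fun row => (row.map (psi N)).sum)).sum

-- ---- basic entry lemmas ----

theorem pvGetO_nonneg (m : List (List (Option Int))) (i j : Int) (hi : 0 ≤ i) (hj : 0 ≤ j) :
    pvGetO m i j = ((m[i.toNat]?.getD [])[j.toNat]?).getD none := by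
  unfold pvGetO
  rw [PySem.List.pyGet?_of_nonneg _ hi, PySem.List.pyGet?_of_nonneg _ hj]

theorem pvGetO_mset_self (m : List (List (Option Int))) (Rn Cn : Nat) (i j : Int) (v : Option Int)
    (hS : ShapeM m Rn Cn) (hi : 0 ≤ i) (hj : 0 ≤ j) (hiR : i < (Rn : Int)) (hjC : j < (Cn : Int)) :
    pvGetO (pvMSet m i j v) i j = v := by
  obtain ⟨hlen, hrow⟩ := hS
  have hn : i.toNat < m.length := by omega
  have hrl : m[i.toNat].length = Cn := hrow _ (List.getElem_mem hn)
  have hk : j.toNat < m[i.toNat].length := by omega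
  rw [pvGetO_nonneg _ _ _ hi hj]
  unfold pvMSet
  simp [List.getElem?_modify, List.getElem?_eq_getElem hn, List.getElem?_set, hk]

theorem pvGetO_mset_ne (m : List (List (Option Int))) (i j i' j' : Int) (v : Option Int)
    (hi : 0 ≤ i) (hj : 0 ≤ j) (hi' : 0 ≤ i') (hj' : 0 ≤ j') (hne : ¬(i' = i ∧ j' = j)) :
    pvGetO (pvMSet m i j v) i' j' = pvGetO m i' j' := by
  rw [pvGetO_nonneg _ _ _ hi' hj', pvGetO_nonneg m _ _ hi' hj']
  unfold pvMSet
  rw [List.getElem?_modify]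
  by_cases hii : i.toNat = i'.toNat
  · have hieq : i' = i := by omega
    have hjne : j' ≠ j := fun h => hne ⟨hieq, h⟩
    have hjj : ¬(j.toNat = j'.toNat) := by omega
    cases hm : m[i'.toNat]? with
    | none => rfl
    | some row => simp [hii, List.getElem?_set, hjj]
  · cases hm : m[i'.toNat]? with
    | none => rfl
    | some row => simp [hii]

theorem ShapeM_mset (m : List (List (Option Int))) (Rn Cn : Nat) (i j : Int) (v : Option Int)
    (hS : ShapeM m Rn Cn) : ShapeM (pvMSet m i j v) Rn Cn := by
  obtain ⟨hlen, hrow⟩ := hS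
  refine ⟨by simpa [pvMSet] using hlen, ?_⟩
  intro row hmem
  obtain ⟨k, hk, hEq⟩ := List.mem_iff_getElem.mp hmem
  have hk' : k < m.length := by simpa [pvMSet] using hk
  have h1 : (pvMSet m i j v)[k]? = some row := by
    rw [List.getElem?_eq_getElem hk, hEq]
  unfold pvMSet at h1
  rw [List.getElem?_modify, List.getElem?_eq_getElem hk'] at h1
  simp at h1
  by_cases hik : i.toNat = k
  · rw [if_pos hik] at h1
    rw [← h1, List.length_set]
    exact hrow _ (List.getElem_mem hk')
  · rw [if_neg hik] at h1
    rw [← h1]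
    exact hrow _ (List.getElem_mem hk')

-- ---- cNone lemmas ----

theorem countP_set_none (row : List (Option Int)) (k : Nat) (x : Int)
    (hk : k < row.length) (h : row[k] = none) :
    (row.set k (some x)).countP (fun v => v.isNone) + 1 = row.countP (fun v => v.isNone) := by
  rw [List.countP_set hk]
  have hpos : 0 < row.countP (fun v => v.isNone) :=
    List.countP_pos_iff.mpr ⟨row[k], List.getElem_mem hk, by simp [h]⟩
  simp [h]
  omega

theorem cNone_modify :
    ∀ (m : List (List (Option Int))) (n : Nat) (f : List (Option Int) → List (Option Int)),
      (hn : n < m.length) →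
      cNone (m.modify n f) + m[n].countP (fun v => v.isNone) =
        cNone m + (f m[n]).countP (fun v => v.isNone)
  | [], n, f, hn => by simp at hn
  | r :: t, 0, f, hn => by simp [cNone, List.modify_zero_cons]; omega
  | r :: t, n + 1, f, hn => by
    have ih := cNone_modify t n f (by simpa using hn)
    simp only [cNone, List.modify_succ_cons, List.map_cons, List.sum_cons,
      List.getElem_cons_succ] at ih ⊢
    omega

theorem cNone_mset (m : List (List (Option Int))) (Rn Cn : Nat) (i j : Int) (x : Int)
    (hS : ShapeM m Rn Cn) (hi : 0 ≤ i) (hj : 0 ≤ j) (hiR : i < (Rn : Int)) (hjC : j < (Cn : Int))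
    (hnone : pvGetO m i j = none) :
    cNone (pvMSet m i j (some x)) + 1 = cNone m := by
  obtain ⟨hlen, hrow⟩ := hS
  have hn : i.toNat < m.length := by omega
  have hrl : m[i.toNat].length = Cn := hrow _ (List.getElem_mem hn)
  have hk : j.toNat < m[i.toNat].length := by omega
  have hget : m[i.toNat][j.toNat] = none := by
    rw [pvGetO_nonneg _ _ _ hi hj, List.getElem?_eq_getElem hn] at hnone
    simpa [List.getElem?_eq_getElem hk] using hnone
  unfold pvMSet
  have h1 := cNone_modify m i.toNat (fun row => row.set j.toNat (some x)) hn
  have h2 := countP_set_none m[i.toNat] j.toNat x hk hget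
  omega

theorem cNone_mset_some (m : List (List (Option Int))) (Rn Cn : Nat) (i j : Int) (x w : Int)
    (hS : ShapeM m Rn Cn) (hi : 0 ≤ i) (hj : 0 ≤ j) (hiR : i < (Rn : Int)) (hjC : j < (Cn : Int))
    (hsome : pvGetO m i j = some w) :
    cNone (pvMSet m i j (some x)) = cNone m := by
  obtain ⟨hlen, hrow⟩ := hS
  have hn : i.toNat < m.length := by omega
  have hrl : m[i.toNat].length = Cn := hrow _ (List.getElem_mem hn)
  have hk : j.toNat < m[i.toNat].length := by omega
  have hget : m[i.toNat][j.toNat] = some w := by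
    rw [pvGetO_nonneg _ _ _ hi hj, List.getElem?_eq_getElem hn] at hsome
    simpa [List.getElem?_eq_getElem hk] using hsome
  unfold pvMSet
  have h1 := cNone_modify m i.toNat (fun row => row.set j.toNat (some x)) hn
  rw [List.countP_set hk, hget] at h1
  simp at h1
  omega

theorem cNone_mset_le (m : List (List (Option Int))) (Rn Cn : Nat) (i j : Int) (x : Int)
    (hS : ShapeM m Rn Cn) (hi : 0 ≤ i) (hj : 0 ≤ j) (hiR : i < (Rn : Int)) (hjC : j < (Cn : Int)) :
    cNone (pvMSet m i j (some x)) ≤ cNone m := by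
  cases hv : pvGetO m i j with
  | none => have := cNone_mset m Rn Cn i j x hS hi hj hiR hjC hv; omega
  | some w => have := cNone_mset_some m Rn Cn i j x w hS hi hj hiR hjC hv; omega

theorem cNone_le (m : List (List (Option Int))) (Rn Cn : Nat) (hS : ShapeM m Rn Cn) :
    cNone m ≤ Rn * Cn := by
  obtain ⟨hlen, hrow⟩ := hS
  have h : cNone m ≤ (m.map (fun row => row.countP (fun v => v.isNone))).length • Cn := by
    apply List.sum_le_card_nsmul
    intro x hx
    obtain ⟨row, hr, rfl⟩ := List.mem_map.mp hx
    exact le_trans List.countP_le_length (le_of_eq (hrow row hr))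
  simpa [hlen, smul_eq_mul] using h

theorem nat_le_sum : ∀ (l : List Nat) (x : Nat), x ∈ l → x ≤ l.sum
  | a :: t, x, h => by
    rcases List.mem_cons.mp h with rfl | h'
    · simp
    · have := nat_le_sum t x h'
      simp
      omega

theorem cNone_pos (m : List (List (Option Int))) (Rn Cn : Nat) (i j : Int)
    (hS : ShapeM m Rn Cn) (hi : 0 ≤ i) (hj : 0 ≤ j) (hiR : i < (Rn : Int)) (hjC : j < (Cn : Int))
    (hnone : pvGetO m i j = none) : 1 ≤ cNone m := by
  obtain ⟨hlen, hrow⟩ := hS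
  have hn : i.toNat < m.length := by omega
  have hrl : m[i.toNat].length = Cn := hrow _ (List.getElem_mem hn)
  have hk : j.toNat < m[i.toNat].length := by omega
  have hget : m[i.toNat][j.toNat] = none := by
    rw [pvGetO_nonneg _ _ _ hi hj, List.getElem?_eq_getElem hn] at hnone
    simpa [List.getElem?_eq_getElem hk] using hnone
  have hcp : 0 < m[i.toNat].countP (fun v => v.isNone) :=
    List.countP_pos_iff.mpr ⟨m[i.toNat][j.toNat], List.getElem_mem hk, by simp [hget]⟩
  have hmem : m[i.toNat].countP (fun v => v.isNone) ∈
      m.map (fun row => row.countP (fun v => v.isNone)) :=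
    List.mem_map.mpr ⟨m[i.toNat], List.getElem_mem hn, rfl⟩
  have := nat_le_sum _ _ hmem
  unfold cNone
  omega

-- ---- phi lemmas ----

theorem sum_map_set {α : Type} (f : α → Nat) :
    ∀ (l : List α) (k : Nat) (x : α) (h : k < l.length),
      ((l.set k x).map f).sum + f (l[k]'h) = (l.map f).sum + f x := by
  intro l
  induction l with
  | nil => intro k x h; simp at h
  | cons a t ih =>
    intro k x h
    cases k with
    | zero => simp; omega
    | succ k =>
      have := ih k x (by simpa using h)
      simp only [List.set_cons_succ, List.map_cons, List.sum_cons, List.getElem_cons_succ]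
      omega

theorem phiM_modify (N : Nat) :
    ∀ (m : List (List (Option Int))) (n : Nat) (f : List (Option Int) → List (Option Int)),
      (hn : n < m.length) →
      phiM N (m.modify n f) + (m[n].map (psi N)).sum = phiM N m + ((f m[n]).map (psi N)).sum
  | [], n, f, hn => by simp at hn
  | r :: t, 0, f, hn => by simp [phiM, List.modify_zero_cons]; omega
  | r :: t, n + 1, f, hn => by
    have ih := phiM_modify N t n f (by simpa using hn)
    simp only [phiM, List.modify_succ_cons, List.map_cons, List.sum_cons,
      List.getElem_cons_succ] at ih ⊢
    omega

theorem phiM_mset (N : Nat) (m : List (List (Option Int))) (Rn Cn : Nat) (i j : Int)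
    (v : Option Int) (hS : ShapeM m Rn Cn) (hi : 0 ≤ i) (hj : 0 ≤ j)
    (hiR : i < (Rn : Int)) (hjC : j < (Cn : Int)) :
    phiM N (pvMSet m i j v) + psi N (pvGetO m i j) = phiM N m + psi N v := by
  obtain ⟨hlen, hrow⟩ := hS
  have hn : i.toNat < m.length := by omega
  have hrl : m[i.toNat].length = Cn := hrow _ (List.getElem_mem hn)
  have hk : j.toNat < m[i.toNat].length := by omega
  have hget : pvGetO m i j = m[i.toNat][j.toNat] := by
    rw [pvGetO_nonneg _ _ _ hi hj]
    simp [List.getElem?_eq_getElem hn, List.getElem?_eq_getElem hk]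
  unfold pvMSet
  have h1 := phiM_modify N m i.toNat (fun row => row.set j.toNat v) hn
  have h2 := sum_map_set (psi N) m[i.toNat] j.toNat v hk
  rw [hget]
  omega

-- ---- order lemmas ----

theorem leO_none_right (x : Option Int) : leO x none := by cases x <;> trivial

theorem leO_refl (x : Option Int) : leO x x := by cases x <;> simp [leO]

theorem leO_trans {a b c : Option Int} (h1 : leO a b) (h2 : leO b c) : leO a c := by
  cases a <;> cases b <;> cases c <;> simp_all [leO] <;> omega

theorem leO_antisymm {a b : Option Int} (h1 : leO a b) (h2 : leO b a) : a = b := by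
  cases a <;> cases b <;> simp_all [leO] <;> omega

theorem PLe_refl (m : List (List (Option Int))) : PLe m m := fun i j _ _ => leO_refl _

theorem PLe_trans {a b c : List (List (Option Int))} (h1 : PLe a b) (h2 : PLe b c) : PLe a c :=
  fun i j hi hj => leO_trans (h1 i j hi hj) (h2 i j hi hj)

theorem infGT_none_right (a : Option Int) : pvInfGT a none = false := by cases a <;> rfl

theorem infGT_false {a : Option Int} {x : Int} (h : pvInfGT a (some x) = false) : leO a (some x) := by
  cases a with
  | none => simp [pvInfGT] at h
  | some w => simp [pvInfGT] at h; simpa [leO] using h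

theorem infGT_true {a : Option Int} {x : Int} (h : pvInfGT a (some x) = true) :
    a = none ∨ ∃ cur : Int, a = some cur ∧ x < cur := by
  cases a with
  | none => exact Or.inl rfl
  | some w => simp [pvInfGT] at h; exact Or.inr ⟨w, rfl, h⟩

theorem dir_neg : ∀ dir ∈ pvDirections, ∃ dir' ∈ pvDirections, dir'.1 = -dir.1 ∧ dir'.2 = -dir.2 := by
  decide

theorem dir_nonzero : ∀ dir ∈ pvDirections, ¬(dir.1 = 0 ∧ dir.2 = 0) := by decide

-- ---- the single relaxation write, with all its consequences ----

theorem upd_main (grid : List (List String)) (Rn Cn : Nat) (m : List (List (Option Int)))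
    (r c nr nc d : Int)
    (hS : ShapeM m Rn Cn) (hVB : VB grid Rn Cn m)
    (hr0 : 0 ≤ r) (hrR : r < (Rn : Int)) (hc0 : 0 ≤ c) (hcC : c < (Cn : Int))
    (hO : pvCell grid r c = "O")
    (hn0 : 0 ≤ nr) (hnR : nr < (Rn : Int)) (hm0 : 0 ≤ nc) (hmC : nc < (Cn : Int))
    (hGO : pvCell grid nr nc = "G" ∨ pvCell grid nr nc = "O")
    (hd : pvGetO m nr nc = some d)
    (hdir : ∃ dir ∈ pvDirections, nr = r + dir.1 ∧ nc = c + dir.2)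
    (hcond : pvGetO m r c = none ∨ ∃ cur : Int, pvGetO m r c = some cur ∧ d + 1 < cur) :
    ShapeM (pvMSet m r c (some (d + 1))) Rn Cn ∧
    VB grid Rn Cn (pvMSet m r c (some (d + 1))) ∧
    PLe (pvMSet m r c (some (d + 1))) m ∧
    phiM (Rn * Cn) (pvMSet m r c (some (d + 1))) < phiM (Rn * Cn) m ∧
    (∀ X, FixM grid (Rn : Int) (Cn : Int) X → PLe X m → PLe X (pvMSet m r c (some (d + 1)))) := by
  have hOW : pvCell grid r c ≠ "W" := by rw [hO]; decide
  have hOG : pvCell grid r c ≠ "G" := by rw [hO]; decide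
  have hcle := cNone_le m Rn Cn hS
  -- bound on the source value d
  have hdb : 0 ≤ d ∧ d + (cNone m : Int) ≤ ((Rn * Cn : Nat) : Int) := by
    rcases hGO with hG | hO'
    · have := (hVB nr nc hn0 hnR hm0 hmC).2.1 hG
      rw [this] at hd
      have hd0 : d = 0 := by simpa using hd.symm
      constructor
      · omega
      · rw [hd0]; push_cast; omega
    · have hW' : pvCell grid nr nc ≠ "W" := by rw [hO']; decide
      have hG' : pvCell grid nr nc ≠ "G" := by rw [hO']; decide
      rcases (hVB nr nc hn0 hnR hm0 hmC).2.2 hW' hG' with hnone | ⟨v, hv, hv0, hvb⟩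
      · rw [hnone] at hd; simp at hd
      · rw [hv] at hd
        have : v = d := by simpa using hd
        subst this
        exact ⟨hv0, hvb⟩
  have hSet := pvGetO_mset_self m Rn Cn r c (some (d + 1)) hS hr0 hc0 hrR hcC
  -- cNone of the new matrix
  have hcNew : cNone (pvMSet m r c (some (d + 1))) ≤ cNone m :=
    cNone_mset_le m Rn Cn r c (d + 1) hS hr0 hc0 hrR hcC
  have hS' : ShapeM (pvMSet m r c (some (d + 1))) Rn Cn := ShapeM_mset m Rn Cn r c _ hS
  have hcBound : (d + 1) + (cNone (pvMSet m r c (some (d + 1))) : Int) ≤ ((Rn * Cn : Nat) : Int) := by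
    rcases hcond with hnone | ⟨cur, hcur, hlt⟩
    · have := cNone_mset m Rn Cn r c (d + 1) hS hr0 hc0 hrR hcC hnone
      omega
    · have heq := cNone_mset_some m Rn Cn r c (d + 1) cur hS hr0 hc0 hrR hcC hcur
      rcases (hVB r c hr0 hrR hc0 hcC).2.2 hOW hOG with h0 | ⟨v, hv, hv0, hvb⟩
      · rw [h0] at hcur; simp at hcur
      · rw [hv] at hcur
        have : v = cur := by simpa using hcur
        subst this
        omega
  refine ⟨hS', ?_, ?_, ?_, ?_⟩
  · -- VB preserved
    intro i j hi hiR' hj hjC'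
    by_cases hij : i = r ∧ j = c
    · obtain ⟨rfl, rfl⟩ := hij
      refine ⟨fun h => absurd h hOW, fun h => absurd h hOG, fun _ _ => ?_⟩
      exact Or.inr ⟨d + 1, hSet, by omega, hcBound⟩
    · have hun := pvGetO_mset_ne m r c i j (some (d + 1)) hr0 hc0 hi hj hij
      obtain ⟨h1, h2, h3⟩ := hVB i j hi hiR' hj hjC'
      refine ⟨fun h => by rw [hun]; exact h1 h, fun h => by rw [hun]; exact h2 h, fun hw hg => ?_⟩
      rcases h3 hw hg with h0 | ⟨v, hv, hv0, hvb⟩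
      · exact Or.inl (by rw [hun]; exact h0)
      · exact Or.inr ⟨v, by rw [hun]; exact hv, hv0, by omega⟩
  · -- pointwise decrease
    intro i j hi hj
    by_cases hij : i = r ∧ j = c
    · obtain ⟨rfl, rfl⟩ := hij
      rw [hSet]
      rcases hcond with hnone | ⟨cur, hcur, hlt⟩
      · rw [hnone]; exact leO_none_right _
      · rw [hcur]; simp [leO]; omega
    · rw [pvGetO_mset_ne m r c i j (some (d + 1)) hr0 hc0 hi hj hij]
      exact leO_refl _
  · -- potential strictly decreases
    have hphi := phiM_mset (Rn * Cn) m Rn Cn r c (some (d + 1)) hS hr0 hc0 hrR hcC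
    rcases hcond with hnone | ⟨cur, hcur, hlt⟩
    · have hcp := cNone_pos m Rn Cn r c hS hr0 hc0 hrR hcC hnone
      rw [hnone] at hphi
      simp only [psi] at hphi
      omega
    · rcases (hVB r c hr0 hrR hc0 hcC).2.2 hOW hOG with h0 | ⟨v, hv, hv0, hvb⟩
      · rw [h0] at hcur; simp at hcur
      · rw [hv] at hcur
        have : v = cur := by simpa using hcur
        subst this
        rw [hv] at hphi
        simp only [psi] at hphi
        omega
  · -- any fixpoint below m stays below
    intro X hFix hPX i j hi hj
    by_cases hij : i = r ∧ j = c
    · rw [hij.1, hij.2, hSet]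
      obtain ⟨dir, hdmem, he1, he2⟩ := hdir
      have hfix := hFix r c hr0 hrR hc0 hcC hO dir hdmem
        (by omega) (by omega) (by omega) (by omega) (by rw [← he1, ← he2]; exact hGO)
      have hnb : leO (pvGetO X (r + dir.1) (c + dir.2)) (some d) := by
        rw [← he1, ← he2]
        have := hPX nr nc hn0 hm0
        rw [hd] at this
        exact this
      cases hx : pvGetO X (r + dir.1) (c + dir.2) with
      | none => rw [hx] at hnb; simp [leO] at hnb
      | some e =>
        rw [hx] at hfix hnb
        have he : e ≤ d := by simpa [leO] using hnb
        refine leO_trans hfix ?_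
        simp [pvInfAdd1, leO]
        omega
    · rw [pvGetO_mset_ne m r c i j (some (d + 1)) hr0 hc0 hi hj hij]
      exact hPX i j hi hj

-- ---- A side: one popped cell's four relaxations ----

theorem relaxA_none_step (grid : List (List String)) (R C pr pc : Int)
    (s : List (List (Option Int)) × List (Int × Int)) (dir : Int × Int) :
    pvRelaxA grid R C pr pc none s dir = s := by
  unfold pvRelaxA
  simp [pvInfAdd1, infGT_none_right]

theorem dirfoldA (grid : List (List String)) (Rn Cn : Nat) (pr pc d : Int)
    (hp1 : 0 ≤ pr) (hp2 : pr < (Rn : Int)) (hp3 : 0 ≤ pc) (hp4 : pc < (Cn : Int))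
    (hpGO : pvCell grid pr pc = "G" ∨ pvCell grid pr pc = "O") :
    ∀ (dirs : List (Int × Int)), (∀ x ∈ dirs, x ∈ pvDirections) →
    ∀ (m : List (List (Option Int))) (q : List (Int × Int)),
    ShapeM m Rn Cn → VB grid Rn Cn m → pvGetO m pr pc = some d →
    ∃ news,
      (dirs.foldl (pvRelaxA grid (Rn : Int) (Cn : Int) pr pc (some d)) (m, q)).2 = q ++ news ∧
      ShapeM (dirs.foldl (pvRelaxA grid (Rn : Int) (Cn : Int) pr pc (some d)) (m, q)).1 Rn Cn ∧
      VB grid Rn Cn (dirs.foldl (pvRelaxA grid (Rn : Int) (Cn : Int) pr pc (some d)) (m, q)).1 ∧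
      PLe (dirs.foldl (pvRelaxA grid (Rn : Int) (Cn : Int) pr pc (some d)) (m, q)).1 m ∧
      pvGetO (dirs.foldl (pvRelaxA grid (Rn : Int) (Cn : Int) pr pc (some d)) (m, q)).1 pr pc = some d ∧
      (∀ t ∈ news, (0 ≤ t.1 ∧ t.1 < (Rn : Int) ∧ 0 ≤ t.2 ∧ t.2 < (Cn : Int)) ∧
        pvCell grid t.1 t.2 = "O") ∧
      (∀ i j : Int, 0 ≤ i → 0 ≤ j → (∀ t ∈ news, ¬(i = t.1 ∧ j = t.2)) →
        pvGetO (dirs.foldl (pvRelaxA grid (Rn : Int) (Cn : Int) pr pc (some d)) (m, q)).1 i j =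
          pvGetO m i j) ∧
      (∀ dir ∈ dirs, 0 ≤ pr + dir.1 → pr + dir.1 < (Rn : Int) → 0 ≤ pc + dir.2 →
        pc + dir.2 < (Cn : Int) → pvCell grid (pr + dir.1) (pc + dir.2) = "O" →
        leO (pvGetO (dirs.foldl (pvRelaxA grid (Rn : Int) (Cn : Int) pr pc (some d)) (m, q)).1
          (pr + dir.1) (pc + dir.2)) (some (d + 1))) ∧
      phiM (Rn * Cn) (dirs.foldl (pvRelaxA grid (Rn : Int) (Cn : Int) pr pc (some d)) (m, q)).1 +
        news.length ≤ phiM (Rn * Cn) m ∧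
      (∀ X, FixM grid (Rn : Int) (Cn : Int) X → PLe X m →
        PLe X (dirs.foldl (pvRelaxA grid (Rn : Int) (Cn : Int) pr pc (some d)) (m, q)).1) := by
  intro dirs
  induction dirs with
  | nil =>
    intro _ m q hS hVB hpv
    exact ⟨[], by simp, hS, hVB, PLe_refl m, hpv, by simp, fun i j _ _ _ => rfl,
      by simp, by simp, fun X _ h => h⟩
  | cons dir rest ih =>
    intro hsub m q hS hVB hpv
    have hdmem : dir ∈ pvDirections := hsub dir List.mem_cons_self
    have hrest : ∀ x ∈ rest, x ∈ pvDirections := fun x hx => hsub x (List.mem_cons_of_mem _ hx)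
    have hnz := dir_nonzero dir hdmem
    simp only [List.foldl_cons]
    by_cases hc1 : (0 ≤ pr + dir.1 ∧ pr + dir.1 < (Rn : Int) ∧ 0 ≤ pc + dir.2 ∧
        pc + dir.2 < (Cn : Int)) ∧ pvCell grid (pr + dir.1) (pc + dir.2) = "O"
    · by_cases hgt : pvInfGT (pvGetO m (pr + dir.1) (pc + dir.2)) (pvInfAdd1 (some d)) = true
      · -- update step
        obtain ⟨⟨hb1, hb2, hb3, hb4⟩, hbO⟩ := hc1
        have hstep : pvRelaxA grid (Rn : Int) (Cn : Int) pr pc (some d) (m, q) dir =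
            (pvMSet m (pr + dir.1) (pc + dir.2) (some (d + 1)), q ++ [(pr + dir.1, pc + dir.2)]) := by
          unfold pvRelaxA
          rw [if_pos ⟨⟨hb1, hb2, hb3, hb4⟩, hbO⟩]
          simp only [pvInfAdd1] at hgt ⊢
          rw [if_pos hgt]
        obtain ⟨dir', hdm', he1, he2⟩ := dir_neg dir hdmem
        have hcond := infGT_true (by simpa [pvInfAdd1] using hgt)
        have hupd := upd_main grid Rn Cn m (pr + dir.1) (pc + dir.2) pr pc d hS hVB
          hb1 hb2 hb3 hb4 hbO hp1 hp2 hp3 hp4 hpGO hpv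
          ⟨dir', hdm', by omega, by omega⟩ hcond
        obtain ⟨uS, uVB, uPLe, uPhi, uX⟩ := hupd
        have hne : ¬(pr = pr + dir.1 ∧ pc = pc + dir.2) := by
          intro ⟨e1, e2⟩; exact hnz ⟨by omega, by omega⟩
        have hpv' : pvGetO (pvMSet m (pr + dir.1) (pc + dir.2) (some (d + 1))) pr pc = some d := by
          rw [pvGetO_mset_ne m _ _ _ _ _ hb1 hb3 hp1 hp3 hne]; exact hpv
        obtain ⟨news', hq', iS, iVB, iPLe, ipv, inews, iunch, ibound, iphi, iX⟩ :=
          ih hrest (pvMSet m (pr + dir.1) (pc + dir.2) (some (d + 1)))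
            (q ++ [(pr + dir.1, pc + dir.2)]) uS uVB hpv'
        rw [hstep]
        refine ⟨(pr + dir.1, pc + dir.2) :: news', by rw [hq']; simp, iS, iVB,
          PLe_trans iPLe uPLe, ipv, ?_, ?_, ?_, ?_, ?_⟩
        · intro t ht
          rcases List.mem_cons.mp ht with rfl | ht'
          · exact ⟨⟨hb1, hb2, hb3, hb4⟩, hbO⟩
          · exact inews t ht'
        · intro i j hi hj hmiss
          have h1 : ∀ t ∈ news', ¬(i = t.1 ∧ j = t.2) :=
            fun t ht => hmiss t (List.mem_cons_of_mem _ ht)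
          rw [iunch i j hi hj h1]
          exact pvGetO_mset_ne m _ _ _ _ _ hb1 hb3 hi hj
            (hmiss (pr + dir.1, pc + dir.2) List.mem_cons_self)
        · intro dir2 hd2 h1 h2 h3 h4 h5
          rcases List.mem_cons.mp hd2 with rfl | hd2'
          · have hmval := pvGetO_mset_self m Rn Cn (pr + dir2.1) (pc + dir2.2) (some (d + 1))
              hS hb1 hb3 hb2 hb4
            have := iPLe (pr + dir2.1) (pc + dir2.2) h1 h3
            rw [hmval] at this
            exact this
          · exact ibound dir2 hd2' h1 h2 h3 h4 h5
        · simp only [List.length_cons]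
          omega
        · intro X hF hPX
          exact iX X hF (uX X hF hPX)
      · -- guard holds but no improvement: identity step
        have hstep : pvRelaxA grid (Rn : Int) (Cn : Int) pr pc (some d) (m, q) dir = (m, q) := by
          unfold pvRelaxA
          rw [if_pos hc1]
          simp only [pvInfAdd1] at hgt ⊢
          rw [if_neg (by simpa using hgt)]
        rw [hstep]
        obtain ⟨news', hq', iS, iVB, iPLe, ipv, inews, iunch, ibound, iphi, iX⟩ :=
          ih hrest m q hS hVB hpv
        refine ⟨news', hq', iS, iVB, iPLe, ipv, inews, iunch, ?_, iphi, iX⟩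
        intro dir2 hd2 h1 h2 h3 h4 h5
        rcases List.mem_cons.mp hd2 with heq | hd2'
        · subst heq
          have hgt' : pvInfGT (pvGetO m (pr + dir2.1) (pc + dir2.2)) (some (d + 1)) = false := by
            have h := eq_false_of_ne_true hgt
            simpa [pvInfAdd1] using h
          exact leO_trans (iPLe (pr + dir2.1) (pc + dir2.2) h1 h3) (infGT_false hgt')
        · exact ibound dir2 hd2' h1 h2 h3 h4 h5
    · -- guard fails: identity step
      have hstep : pvRelaxA grid (Rn : Int) (Cn : Int) pr pc (some d) (m, q) dir = (m, q) := by
        unfold pvRelaxA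
        rw [if_neg hc1]
      rw [hstep]
      obtain ⟨news', hq', iS, iVB, iPLe, ipv, inews, iunch, ibound, iphi, iX⟩ :=
        ih hrest m q hS hVB hpv
      refine ⟨news', hq', iS, iVB, iPLe, ipv, inews, iunch, ?_, iphi, iX⟩
      intro dir2 hd2 h1 h2 h3 h4 h5
      rcases List.mem_cons.mp hd2 with rfl | hd2'
      · exact absurd ⟨⟨h1, h2, h3, h4⟩, h5⟩ hc1
      · exact ibound dir2 hd2' h1 h2 h3 h4 h5

-- Q2 with an empty queue is exactly the fixpoint property
theorem fixM_of_Q2_nil (grid : List (List String)) (R C : Int) (m : List (List (Option Int)))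
    (h2 : Q2 grid R C m []) : FixM grid R C m := by
  intro r c hr0 hrR hc0 hcC hO dir hdmem h1 h2' h3 h4 hGO
  cases hb : pvGetO m (r + dir.1) (c + dir.2) with
  | none => simp only [pvInfAdd1]; exact leO_none_right _
  | some v =>
    obtain ⟨dir', hdm', he1, he2⟩ := dir_neg dir hdmem
    have happ := h2 (r + dir.1) (c + dir.2) h1 h2' h3 h4 hGO v hb (by simp) dir' hdm'
      (by omega) (by omega) (by omega) (by omega)
      (by rw [show r + dir.1 + dir'.1 = r by omega, show c + dir.2 + dir'.2 = c by omega]; exact hO)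
    rw [show r + dir.1 + dir'.1 = r by omega, show c + dir.2 + dir'.2 = c by omega] at happ
    simpa [pvInfAdd1] using happ

-- A's whole BFS: it ends (inside the given fuel) in a fixpoint, only ever decreasing,
-- and never crossing below any fixpoint it started above
theorem bfsA_run (grid : List (List String)) (Rn Cn : Nat) :
    ∀ (fuel : Nat) (m : List (List (Option Int))) (Q : List (Int × Int)),
    ShapeM m Rn Cn → VB grid Rn Cn m → Q1 grid (Rn : Int) (Cn : Int) Q →
    Q2 grid (Rn : Int) (Cn : Int) m Q →
    Q.length + phiM (Rn * Cn) m < fuel →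
    ShapeM (pvBfsA grid (Rn : Int) (Cn : Int) fuel m Q) Rn Cn ∧
    FixM grid (Rn : Int) (Cn : Int) (pvBfsA grid (Rn : Int) (Cn : Int) fuel m Q) ∧
    PLe (pvBfsA grid (Rn : Int) (Cn : Int) fuel m Q) m ∧
    (∀ X, FixM grid (Rn : Int) (Cn : Int) X → PLe X m →
      PLe X (pvBfsA grid (Rn : Int) (Cn : Int) fuel m Q)) := by
  intro fuel
  induction fuel with
  | zero => intro m Q _ _ _ _ hf; omega
  | succ fuel ih =>
    intro m Q hS hVB hQ1 hQ2 hf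
    cases Q with
    | nil =>
      have : pvBfsA grid (Rn : Int) (Cn : Int) (fuel + 1) m [] = m := rfl
      rw [this]
      exact ⟨hS, fixM_of_Q2_nil grid _ _ m hQ2, PLe_refl m, fun X _ h => h⟩
    | cons p rest =>
      obtain ⟨pr, pc⟩ := p
      obtain ⟨⟨hp1, hp2, hp3, hp4⟩, hpGO⟩ := hQ1 (pr, pc) List.mem_cons_self
      have hQ1' : Q1 grid (Rn : Int) (Cn : Int) rest :=
        fun x hx => hQ1 x (List.mem_cons_of_mem _ hx)
      have hunfold : pvBfsA grid (Rn : Int) (Cn : Int) (fuel + 1) m ((pr, pc) :: rest) =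
          pvBfsA grid (Rn : Int) (Cn : Int) fuel
            (pvDirections.foldl (pvRelaxA grid (Rn : Int) (Cn : Int) pr pc (pvGetO m pr pc))
              (m, rest)).1
            (pvDirections.foldl (pvRelaxA grid (Rn : Int) (Cn : Int) pr pc (pvGetO m pr pc))
              (m, rest)).2 := rfl
      rw [hunfold]
      cases hcurr : pvGetO m pr pc with
      | none =>
        have hid : pvDirections.foldl (pvRelaxA grid (Rn : Int) (Cn : Int) pr pc none)
            (m, rest) = (m, rest) := by
          simp [pvDirections, relaxA_none_step]
        rw [hid]
        have hQ2' : Q2 grid (Rn : Int) (Cn : Int) m rest := by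
          intro b1 b2 g1 g2 g3 g4 gGO v hv hnin dir hdm k1 k2 k3 k4 kO
          by_cases hbp : (b1, b2) = (pr, pc)
          · have e1 : b1 = pr := congrArg Prod.fst hbp
            have e2 : b2 = pc := congrArg Prod.snd hbp
            rw [e1, e2, hcurr] at hv
            simp at hv
          · exact hQ2 b1 b2 g1 g2 g3 g4 gGO v hv
              (by intro hin; rcases List.mem_cons.mp hin with h | h
                  · exact hbp h
                  · exact hnin h) dir hdm k1 k2 k3 k4 kO
        exact ih m rest hS hVB hQ1' hQ2' (by simp at hf ⊢; omega)
      | some d =>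
        obtain ⟨news, hq', fS, fVB, fPLe, fpv, fnews, funch, fbound, fphi, fX⟩ :=
          dirfoldA grid Rn Cn pr pc d hp1 hp2 hp3 hp4 hpGO pvDirections (fun x hx => hx)
            m rest hS hVB hcurr
        have hQ1'' : Q1 grid (Rn : Int) (Cn : Int)
            (pvDirections.foldl (pvRelaxA grid (Rn : Int) (Cn : Int) pr pc (some d)) (m, rest)).2 := by
          rw [hq']
          intro x hx
          rcases List.mem_append.mp hx with h | h
          · exact hQ1' x h
          · obtain ⟨hin, hO⟩ := fnews x h
            exact ⟨hin, Or.inr hO⟩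
        have hQ2'' : Q2 grid (Rn : Int) (Cn : Int)
            (pvDirections.foldl (pvRelaxA grid (Rn : Int) (Cn : Int) pr pc (some d)) (m, rest)).1
            (pvDirections.foldl (pvRelaxA grid (Rn : Int) (Cn : Int) pr pc (some d)) (m, rest)).2 := by
          rw [hq']
          intro b1 b2 g1 g2 g3 g4 gGO v hv hnin dir hdm k1 k2 k3 k4 kO
          by_cases hbp : b1 = pr ∧ b2 = pc
          · obtain ⟨rfl, rfl⟩ := hbp
            have hvd : v = d := by rw [fpv] at hv; exact (Option.some.inj hv).symm
            subst hvd
            exact fbound dir hdm k1 k2 k3 k4 kO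
          · have hbnotnews : ∀ t ∈ news, ¬(b1 = t.1 ∧ b2 = t.2) := by
              intro t ht ⟨e1, e2⟩
              exact hnin (List.mem_append.mpr (Or.inr (by rw [e1, e2]; exact ht)))
            have hbv : pvGetO m b1 b2 = some v := by
              rw [← funch b1 b2 g1 g3 hbnotnews]; exact hv
            have hnin' : (b1, b2) ∉ (pr, pc) :: rest := by
              intro hin
              rcases List.mem_cons.mp hin with h | h
              · exact hbp ⟨congrArg Prod.fst h, congrArg Prod.snd h⟩
              · exact hnin (List.mem_append.mpr (Or.inl h))
            have := hQ2 b1 b2 g1 g2 g3 g4 gGO v hbv hnin' dir hdm k1 k2 k3 k4 kO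
            exact leO_trans (fPLe (b1 + dir.1) (b2 + dir.2) k1 k3) this
        have hf' : (pvDirections.foldl (pvRelaxA grid (Rn : Int) (Cn : Int) pr pc (some d))
            (m, rest)).2.length + phiM (Rn * Cn)
            (pvDirections.foldl (pvRelaxA grid (Rn : Int) (Cn : Int) pr pc (some d)) (m, rest)).1
            < fuel := by
          rw [hq']
          simp only [List.length_append, List.length_cons] at hf ⊢
          omega
        obtain ⟨rS, rFix, rPLe, rX⟩ := ih _ _ fS fVB hQ1'' hQ2'' hf'
        exact ⟨rS, rFix, PLe_trans rPLe fPLe, fun X hF hPX => rX X hF (fX X hF hPX)⟩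

-- ---- B side ----

-- invariant carried through one sweep, relative to the matrix at the start of the sweep
def SInv (grid : List (List String)) (Rn Cn : Nat) (m0 : List (List (Option Int)))
    (s : List (List (Option Int)) × Bool) : Prop :=
  ShapeM s.1 Rn Cn ∧ VB grid Rn Cn s.1 ∧ PLe s.1 m0 ∧
  (∀ X, FixM grid (Rn : Int) (Cn : Int) X → PLe X m0 → PLe X s.1) ∧
  (s.2 = false → s.1 = m0) ∧
  (s.2 = true → phiM (Rn * Cn) s.1 < phiM (Rn * Cn) m0)

theorem foldl_pres {σ E : Type} (P : σ → Prop) (f : σ → E → σ) :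
    ∀ (l : List E), (∀ e ∈ l, ∀ s, P s → P (f s e)) → ∀ s, P s → P (l.foldl f s)
  | [], _, s, hs => hs
  | e :: t, h, s, hs =>
    foldl_pres P f t (fun e' he' => h e' (List.mem_cons_of_mem _ he')) (f s e)
      (h e List.mem_cons_self s hs)

theorem foldl_id_of_false {M E : Type} (f : M × Bool → E → M × Bool)
    (h : ∀ s e, (f s e).2 = false → f s e = s) :
    ∀ (l : List E) (s : M × Bool), (l.foldl f s).2 = false →
      l.foldl f s = s ∧ ∀ e ∈ l, f s e = s := by
  intro l
  induction l with
  | nil => intro s _; exact ⟨rfl, by simp⟩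
  | cons e t ih =>
    intro s hflag
    simp only [List.foldl_cons] at hflag ⊢
    obtain ⟨h1, h2⟩ := ih (f s e) hflag
    have hfe : (f s e).2 = false := by rw [← h1]; exact hflag
    have hse : f s e = s := h s e hfe
    rw [hse] at h1 h2 ⊢
    refine ⟨h1, ?_⟩
    intro e' he'
    rcases List.mem_cons.mp he' with rfl | he''
    · exact hse
    · exact h2 e' he''

theorem updB_pres (grid : List (List String)) (Rn Cn : Nat) (m0 : List (List (Option Int)))
    (r c : Int) (hr0 : 0 ≤ r) (hrR : r < (Rn : Int)) (hc0 : 0 ≤ c) (hcC : c < (Cn : Int))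
    (hO : pvCell grid r c = "O") (nb : Int × Int)
    (hdir : ∃ dir ∈ pvDirections, nb.1 = r + dir.1 ∧ nb.2 = c + dir.2)
    (s : List (List (Option Int)) × Bool) (hs : SInv grid Rn Cn m0 s) :
    SInv grid Rn Cn m0 (pvUpdB grid (Rn : Int) (Cn : Int) r c s nb) := by
  obtain ⟨hS, hVB, hPLe, hX, hfl, htr⟩ := hs
  unfold pvUpdB
  by_cases hc1 : (0 ≤ nb.1 ∧ nb.1 < (Rn : Int) ∧ 0 ≤ nb.2 ∧ nb.2 < (Cn : Int)) ∧
      (pvCell grid nb.1 nb.2 = "G" ∨ pvCell grid nb.1 nb.2 = "O")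
  · rw [if_pos hc1]
    obtain ⟨⟨hn0, hnR, hm0, hmC⟩, hGO⟩ := hc1
    split
    case h_1 => exact ⟨hS, hVB, hPLe, hX, hfl, htr⟩
    case h_2 d hval =>
      by_cases hb : (match pvGetO s.1 r c with
          | none => true
          | some cur => decide (d + 1 < cur)) = true
      · rw [if_pos hb]
        have hcond : pvGetO s.1 r c = none ∨
            ∃ cur : Int, pvGetO s.1 r c = some cur ∧ d + 1 < cur := by
          cases hcur : pvGetO s.1 r c with
          | none => exact Or.inl rfl
          | some cur =>
            rw [hcur] at hb
            simp at hb
            exact Or.inr ⟨cur, rfl, hb⟩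
        obtain ⟨uS, uVB, uPLe, uPhi, uX⟩ := upd_main grid Rn Cn s.1 r c nb.1 nb.2 d hS hVB
          hr0 hrR hc0 hcC hO hn0 hnR hm0 hmC hGO hval hdir hcond
        refine ⟨uS, uVB, PLe_trans uPLe hPLe, ?_, by simp, ?_⟩
        · intro X hF hPX
          exact uX X hF (hX X hF hPX)
        · intro _
          cases hflag : s.2 with
          | false => rw [hfl hflag] at uPhi ⊢; exact uPhi
          | true => exact lt_trans uPhi (htr hflag)
      · rw [if_neg hb]
        exact ⟨hS, hVB, hPLe, hX, hfl, htr⟩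
  · rw [if_neg hc1]
    exact ⟨hS, hVB, hPLe, hX, hfl, htr⟩

theorem nbr_dirs (r c : Int) :
    ∀ nb ∈ [(r - 1, c), (r + 1, c), (r, c + 1), (r, c - 1)],
      ∃ dir ∈ pvDirections, nb.1 = r + dir.1 ∧ nb.2 = c + dir.2 := by
  intro nb hnb
  simp only [List.mem_cons, List.not_mem_nil, or_false] at hnb
  rcases hnb with rfl | rfl | rfl | rfl
  · exact ⟨(-1, 0), by simp [pvDirections], by constructor <;> simp <;> omega⟩
  · exact ⟨(1, 0), by simp [pvDirections], by constructor <;> simp⟩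
  · exact ⟨(0, 1), by simp [pvDirections], by constructor <;> simp⟩
  · exact ⟨(0, -1), by simp [pvDirections], by constructor <;> simp <;> omega⟩

theorem sweepB_inv (grid : List (List String)) (Rn Cn : Nat) (m : List (List (Option Int)))
    (hS : ShapeM m Rn Cn) (hVB : VB grid Rn Cn m) :
    SInv grid Rn Cn m (pvSweepB grid (Rn : Int) (Cn : Int) m) := by
  unfold pvSweepB
  apply foldl_pres (SInv grid Rn Cn m)
  · intro r hr s hs
    have hrng := PySem.List.mem_pyRange_one.mp hr
    apply foldl_pres (SInv grid Rn Cn m)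
    · intro c hc s' hs'
      have hcng := PySem.List.mem_pyRange_one.mp hc
      by_cases hO : pvCell grid r c = "O"
      · rw [if_pos hO]
        apply foldl_pres (SInv grid Rn Cn m)
        · intro nb hnb s'' hs''
          exact updB_pres grid Rn Cn m r c hrng.1 hrng.2 hcng.1 hcng.2 hO nb
            (nbr_dirs r c nb hnb) s'' hs''
        · exact hs'
      · rw [if_neg hO]; exact hs'
    · exact hs
  · exact ⟨hS, hVB, PLe_refl m, fun X _ h => h, fun _ => rfl, by simp⟩

theorem updB_cases (grid : List (List String)) (R C r c : Int)
    (s : List (List (Option Int)) × Bool) (nb : Int × Int) :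
    pvUpdB grid R C r c s nb = s ∨ (pvUpdB grid R C r c s nb).2 = true := by
  unfold pvUpdB
  repeat' split
  all_goals first | exact Or.inl rfl | exact Or.inr rfl

theorem updB_false (grid : List (List String)) (R C r c : Int)
    (s : List (List (Option Int)) × Bool) (nb : Int × Int)
    (h : (pvUpdB grid R C r c s nb).2 = false) : pvUpdB grid R C r c s nb = s := by
  rcases updB_cases grid R C r c s nb with he | ht
  · exact he
  · rw [ht] at h; simp at h

theorem updB_id_le (grid : List (List String)) (R C r c : Int)
    (s : List (List (Option Int)) × Bool) (nb : Int × Int)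
    (hc1 : (0 ≤ nb.1 ∧ nb.1 < R ∧ 0 ≤ nb.2 ∧ nb.2 < C) ∧
      (pvCell grid nb.1 nb.2 = "G" ∨ pvCell grid nb.1 nb.2 = "O"))
    (hflag : s.2 = false)
    (h : pvUpdB grid R C r c s nb = s) :
    leO (pvGetO s.1 r c) (pvInfAdd1 (pvGetO s.1 nb.1 nb.2)) := by
  unfold pvUpdB at h
  rw [if_pos hc1] at h
  cases hval : pvGetO s.1 nb.1 nb.2 with
  | none =>
    simp only [pvInfAdd1]
    exact leO_none_right _
  | some d =>
    rw [hval] at h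
    have h' : (if ((match pvGetO s.1 r c with
        | none => true
        | some cur' => decide (d + 1 < cur')) = true) then
        (pvMSet s.1 r c (some (d + 1)), true) else s) = s := h
    cases hcur : pvGetO s.1 r c with
    | none =>
      rw [hcur] at h'
      rw [if_pos (show (match (none : Option Int) with
        | none => true
        | some cur' => decide (d + 1 < cur')) = true from rfl)] at h'
      have hsnd : true = s.2 := congrArg Prod.snd h'
      rw [hflag] at hsnd
      exact absurd hsnd (by decide)
    | some cur =>
      rw [hcur] at h'
      by_cases hlt : d + 1 < cur
      · rw [if_pos (show (match (some cur : Option Int) with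
          | none => true
          | some cur' => decide (d + 1 < cur')) = true from decide_eq_true hlt)] at h'
        have hsnd : true = s.2 := congrArg Prod.snd h'
        rw [hflag] at hsnd
        exact absurd hsnd (by decide)
      · simp only [pvInfAdd1, leO]
        omega

theorem cellstep_false (grid : List (List String)) (R C r : Int)
    (s : List (List (Option Int)) × Bool) (c : Int)
    (h : ((if pvCell grid r c = "O" then
        [(r - 1, c), (r + 1, c), (r, c + 1), (r, c - 1)].foldl (pvUpdB grid R C r c) s
      else s)).2 = false) :
    (if pvCell grid r c = "O" then
        [(r - 1, c), (r + 1, c), (r, c + 1), (r, c - 1)].foldl (pvUpdB grid R C r c) s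
      else s) = s := by
  by_cases hO : pvCell grid r c = "O"
  · rw [if_pos hO] at h ⊢
    exact (foldl_id_of_false (pvUpdB grid R C r c) (updB_false grid R C r c) _ s h).1
  · rw [if_neg hO]

theorem rowstep_false (grid : List (List String)) (R C : Int)
    (s : List (List (Option Int)) × Bool) (r : Int)
    (h : ((PySem.List.pyRange 0 C 1).foldl (fun s c =>
        if pvCell grid r c = "O" then
          [(r - 1, c), (r + 1, c), (r, c + 1), (r, c - 1)].foldl (pvUpdB grid R C r c) s
        else s) s).2 = false) :
    (PySem.List.pyRange 0 C 1).foldl (fun s c =>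
        if pvCell grid r c = "O" then
          [(r - 1, c), (r + 1, c), (r, c + 1), (r, c - 1)].foldl (pvUpdB grid R C r c) s
        else s) s = s :=
  (foldl_id_of_false _ (cellstep_false grid R C r) _ s h).1

theorem sweepB_false_fix (grid : List (List String)) (Rn Cn : Nat) (m : List (List (Option Int)))
    (h : (pvSweepB grid (Rn : Int) (Cn : Int) m).2 = false) :
    pvSweepB grid (Rn : Int) (Cn : Int) m = (m, false) ∧
      FixM grid (Rn : Int) (Cn : Int) m := by
  unfold pvSweepB at h
  obtain ⟨htop, hrows⟩ := foldl_id_of_false _ (rowstep_false grid (Rn : Int) (Cn : Int)) _ (m, false) h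
  constructor
  · exact htop
  · intro r c hr0 hrR hc0 hcC hO dir hdmem k1 k2 k3 k4 hGO
    have hrmem : r ∈ PySem.List.pyRange 0 (Rn : Int) 1 :=
      PySem.List.mem_pyRange_one.mpr ⟨hr0, hrR⟩
    have hrow := hrows r hrmem
    have hrflag : ((PySem.List.pyRange 0 (Cn : Int) 1).foldl (fun s c =>
        if pvCell grid r c = "O" then
          [(r - 1, c), (r + 1, c), (r, c + 1), (r, c - 1)].foldl
            (pvUpdB grid (Rn : Int) (Cn : Int) r c) s
        else s) (m, false)).2 = false := by rw [hrow]
    obtain ⟨_, hcells⟩ := foldl_id_of_false _ (cellstep_false grid (Rn : Int) (Cn : Int) r) _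
      (m, false) hrflag
    have hcmem : c ∈ PySem.List.pyRange 0 (Cn : Int) 1 :=
      PySem.List.mem_pyRange_one.mpr ⟨hc0, hcC⟩
    have hcell := hcells c hcmem
    rw [if_pos hO] at hcell
    have hcflag : ([(r - 1, c), (r + 1, c), (r, c + 1), (r, c - 1)].foldl
        (pvUpdB grid (Rn : Int) (Cn : Int) r c) (m, false)).2 = false := by rw [hcell]
    obtain ⟨_, hupds⟩ := foldl_id_of_false _ (updB_false grid (Rn : Int) (Cn : Int) r c) _
      (m, false) hcflag
    -- pick the neighbour list element matching dir
    have hnb : pvUpdB grid (Rn : Int) (Cn : Int) r c (m, false) (r + dir.1, c + dir.2) = (m, false) := by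
      have hdm : dir ∈ pvDirections := hdmem
      simp only [pvDirections, List.mem_cons, List.not_mem_nil, or_false] at hdm
      rcases hdm with rfl | rfl | rfl | rfl
      · have := hupds (r - 1, c) (by simp)
        simpa [show r + (-1 : Int) = r - 1 by omega] using this
      · have := hupds (r + 1, c) (by simp)
        simpa using this
      · have := hupds (r, c + 1) (by simp)
        simpa using this
      · have := hupds (r, c - 1) (by simp)
        simpa [show c + (-1 : Int) = c - 1 by omega] using this
    exact updB_id_le grid (Rn : Int) (Cn : Int) r c (m, false) (r + dir.1, c + dir.2)
      ⟨⟨k1, k2, k3, k4⟩, hGO⟩ rfl hnb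

theorem loopB_run (grid : List (List String)) (Rn Cn : Nat) :
    ∀ (fuel : Nat) (m : List (List (Option Int))),
    ShapeM m Rn Cn → VB grid Rn Cn m → phiM (Rn * Cn) m + 2 ≤ fuel →
    ShapeM (pvLoopB grid (Rn : Int) (Cn : Int) fuel m) Rn Cn ∧
    FixM grid (Rn : Int) (Cn : Int) (pvLoopB grid (Rn : Int) (Cn : Int) fuel m) ∧
    PLe (pvLoopB grid (Rn : Int) (Cn : Int) fuel m) m ∧
    (∀ X, FixM grid (Rn : Int) (Cn : Int) X → PLe X m →
      PLe X (pvLoopB grid (Rn : Int) (Cn : Int) fuel m)) := by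
  intro fuel
  induction fuel with
  | zero => intro m _ _ hf; omega
  | succ fuel ih =>
    intro m hS hVB hf
    have hunfold : pvLoopB grid (Rn : Int) (Cn : Int) (fuel + 1) m =
        if (pvSweepB grid (Rn : Int) (Cn : Int) m).2 then
          pvLoopB grid (Rn : Int) (Cn : Int) fuel (pvSweepB grid (Rn : Int) (Cn : Int) m).1
        else (pvSweepB grid (Rn : Int) (Cn : Int) m).1 := rfl
    rw [hunfold]
    obtain ⟨sS, sVB, sPLe, sX, sfl, str⟩ := sweepB_inv grid Rn Cn m hS hVB
    cases hflag : (pvSweepB grid (Rn : Int) (Cn : Int) m).2 with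
    | false =>
      rw [if_neg (by simp)]
      obtain ⟨_, hFix⟩ := sweepB_false_fix grid Rn Cn m hflag
      rw [sfl hflag]
      exact ⟨hS, hFix, PLe_refl m, fun X _ h => h⟩
    | true =>
      rw [if_pos (by trivial)]
      have hphi := str hflag
      obtain ⟨rS, rFix, rPLe, rX⟩ := ih _ sS sVB (by omega)
      exact ⟨rS, rFix, PLe_trans rPLe sPLe, fun X hF hPX => rX X hF (sX X hF hPX)⟩

-- ---- initialization ----

theorem dist0A_shape (grid : List (List String)) :
    ShapeM (pvDist0A grid) grid.length (grid.headD []).length := by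
  constructor
  · simp [pvDist0A, PySem.List.length_pyRange_one]
  · intro row hrow
    obtain ⟨r, _, rfl⟩ := List.mem_map.mp hrow
    simp [PySem.List.length_pyRange_one]

theorem d0A_get (grid : List (List String)) (i j : Int) (hi : 0 ≤ i) (hj : 0 ≤ j) :
    pvGetO (pvDist0A grid) i j =
      if i < (grid.length : Int) ∧ j < ((grid.headD []).length : Int) then
        (if pvCell grid i j = "W" then some (-1) else none)
      else none := by
  rw [pvGetO_nonneg _ _ _ hi hj]
  unfold pvDist0A
  by_cases hiR : i < (grid.length : Int)
  · have h1 : i.toNat < grid.length := by omega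
    rw [PySem.List.getElem?_map_pyRange_zero _ _ _ h1]
    simp only [Option.getD_some]
    have hci : ((i.toNat : Int)) = i := by omega
    rw [hci]
    by_cases hjC : j < ((grid.headD []).length : Int)
    · have h2 : j.toNat < (grid.headD []).length := by omega
      rw [PySem.List.getElem?_map_pyRange_zero _ _ _ h2]
      have hin' : i < (grid.length : Int) ∧ j < ((grid.headD []).length : Int) := ⟨hiR, hjC⟩
      have hcj : ((j.toNat : Int)) = j := by omega
      simp only [Option.getD_some]
      rw [hcj, if_pos hin']
    · have hnin : ¬(i < (grid.length : Int) ∧ j < ((grid.headD []).length : Int)) :=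
        fun hc => hjC hc.2
      rw [List.getElem?_eq_none
        (by simp only [List.length_map, PySem.List.length_pyRange_one]; omega)]
      rw [if_neg hnin]
      rfl
  · have hnin : ¬(i < (grid.length : Int) ∧ j < ((grid.headD []).length : Int)) :=
      fun hc => hiR hc.1
    have hrow : ((PySem.List.pyRange 0 (grid.length : Int) 1).map (fun r =>
        (PySem.List.pyRange 0 ((grid.headD []).length : Int) 1).map
          (fun c => if pvCell grid r c = "W" then some (-1) else none)))[i.toNat]? =
        (none : Option (List (Option Int))) :=
      List.getElem?_eq_none (by rw [List.length_map, PySem.List.length_pyRange_one]; omega)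
    rw [hrow, if_neg hnin]
    rfl

-- one row of the guard-enqueueing loop
theorem guardrow (grid : List (List String)) (Rn Cn : Nat) (r : Int) (hr0 : 0 ≤ r)
    (hrR : r < (Rn : Int)) :
    ∀ (cols : List Int) (s : List (List (Option Int)) × List (Int × Int)),
    (∀ x ∈ cols, 0 ≤ x ∧ x < (Cn : Int)) → ShapeM s.1 Rn Cn →
    ShapeM (cols.foldl (fun s col => if pvCell grid r col = "G" then
        (pvMSet s.1 r col (some 0), s.2 ++ [(r, col)]) else s) s).1 Rn Cn ∧
    (∀ i j : Int, 0 ≤ i → 0 ≤ j →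
      pvGetO (cols.foldl (fun s col => if pvCell grid r col = "G" then
          (pvMSet s.1 r col (some 0), s.2 ++ [(r, col)]) else s) s).1 i j =
        if i = r ∧ j ∈ cols ∧ pvCell grid r j = "G" then some 0 else pvGetO s.1 i j) ∧
    (cols.foldl (fun s col => if pvCell grid r col = "G" then
        (pvMSet s.1 r col (some 0), s.2 ++ [(r, col)]) else s) s).2 =
      s.2 ++ (cols.filter (fun c' => decide (pvCell grid r c' = "G"))).map (fun c' => (r, c')) := by
  intro cols
  induction cols with
  | nil =>
    intro s _ hS
    exact ⟨hS, fun i j _ _ => by simp, by simp⟩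
  | cons c0 cols ih =>
    intro s hbnd hS
    have hc0 := hbnd c0 List.mem_cons_self
    have hbnd' : ∀ x ∈ cols, 0 ≤ x ∧ x < (Cn : Int) :=
      fun x hx => hbnd x (List.mem_cons_of_mem _ hx)
    simp only [List.foldl_cons]
    by_cases hg : pvCell grid r c0 = "G"
    · rw [if_pos hg]
      have hS1 : ShapeM (pvMSet s.1 r c0 (some 0)) Rn Cn := ShapeM_mset _ _ _ _ _ _ hS
      obtain ⟨jS, jget, jq⟩ := ih (pvMSet s.1 r c0 (some 0), s.2 ++ [(r, c0)]) hbnd' hS1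
      refine ⟨jS, ?_, ?_⟩
      · intro i j hi hj
        rw [jget i j hi hj]
        by_cases hcond : i = r ∧ j ∈ cols ∧ pvCell grid r j = "G"
        · rw [if_pos hcond, if_pos ⟨hcond.1, List.mem_cons_of_mem _ hcond.2.1, hcond.2.2⟩]
        · rw [if_neg hcond]
          by_cases hjc : i = r ∧ j = c0
          · have hnew : pvGetO (pvMSet s.1 r c0 (some 0)) i j = some 0 := by
              rw [hjc.1, hjc.2]
              exact pvGetO_mset_self s.1 Rn Cn _ _ _ hS hr0 hc0.1 hrR hc0.2
            rw [hnew, if_pos ⟨hjc.1, by rw [hjc.2]; exact List.mem_cons_self,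
              by rw [hjc.2]; exact hg⟩]
          · have hold : pvGetO (pvMSet s.1 r c0 (some 0)) i j = pvGetO s.1 i j :=
              pvGetO_mset_ne s.1 r c0 i j _ hr0 hc0.1 hi hj hjc
            rw [hold, if_neg (by
              rintro ⟨e1, e2, e3⟩
              rcases List.mem_cons.mp e2 with rfl | hmem
              · exact hjc ⟨e1, rfl⟩
              · exact hcond ⟨e1, hmem, e3⟩)]
      · rw [jq]
        simp [hg, List.append_assoc]
    · rw [if_neg hg]
      obtain ⟨jS, jget, jq⟩ := ih s hbnd' hS
      refine ⟨jS, ?_, ?_⟩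
      · intro i j hi hj
        rw [jget i j hi hj]
        by_cases hcond : i = r ∧ j ∈ cols ∧ pvCell grid r j = "G"
        · rw [if_pos hcond, if_pos ⟨hcond.1, List.mem_cons_of_mem _ hcond.2.1, hcond.2.2⟩]
        · rw [if_neg hcond, if_neg (by
            rintro ⟨e1, e2, e3⟩
            rcases List.mem_cons.mp e2 with rfl | hmem
            · exact hg e3
            · exact hcond ⟨e1, hmem, e3⟩)]
      · rw [jq]
        simp [hg]

-- the whole guard-enqueueing double loop
theorem guardfold (grid : List (List String)) (Rn Cn : Nat) :
    ∀ (rows : List Int) (s : List (List (Option Int)) × List (Int × Int)),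
    (∀ x ∈ rows, 0 ≤ x ∧ x < (Rn : Int)) → ShapeM s.1 Rn Cn →
    ShapeM (rows.foldl (fun s row => (PySem.List.pyRange 0 (Cn : Int) 1).foldl
        (fun s col => if pvCell grid row col = "G" then
          (pvMSet s.1 row col (some 0), s.2 ++ [(row, col)]) else s) s) s).1 Rn Cn ∧
    (∀ i j : Int, 0 ≤ i → 0 ≤ j →
      pvGetO (rows.foldl (fun s row => (PySem.List.pyRange 0 (Cn : Int) 1).foldl
          (fun s col => if pvCell grid row col = "G" then
            (pvMSet s.1 row col (some 0), s.2 ++ [(row, col)]) else s) s) s).1 i j =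
        if i ∈ rows ∧ j < (Cn : Int) ∧ 0 ≤ j ∧ pvCell grid i j = "G" then some 0
        else pvGetO s.1 i j) ∧
    (rows.foldl (fun s row => (PySem.List.pyRange 0 (Cn : Int) 1).foldl
        (fun s col => if pvCell grid row col = "G" then
          (pvMSet s.1 row col (some 0), s.2 ++ [(row, col)]) else s) s) s).2 =
      s.2 ++ rows.flatMap (fun r => ((PySem.List.pyRange 0 (Cn : Int) 1).filter
        (fun c' => decide (pvCell grid r c' = "G"))).map (fun c' => (r, c'))) := by
  intro rows
  induction rows with
  | nil =>
    intro s _ hS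
    exact ⟨hS, fun i j _ _ => by simp, by simp⟩
  | cons r0 rows ih =>
    intro s hbnd hS
    have hr0 := hbnd r0 List.mem_cons_self
    have hbnd' : ∀ x ∈ rows, 0 ≤ x ∧ x < (Rn : Int) :=
      fun x hx => hbnd x (List.mem_cons_of_mem _ hx)
    simp only [List.foldl_cons]
    obtain ⟨gS, gget, gq⟩ := guardrow grid Rn Cn r0 hr0.1 hr0.2
      (PySem.List.pyRange 0 (Cn : Int) 1) s
      (fun x hx => by
        have := PySem.List.mem_pyRange_one.mp hx
        exact ⟨this.1, this.2⟩) hS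
    obtain ⟨jS, jget, jq⟩ := ih ((PySem.List.pyRange 0 (Cn : Int) 1).foldl
      (fun s col => if pvCell grid r0 col = "G" then
        (pvMSet s.1 r0 col (some 0), s.2 ++ [(r0, col)]) else s) s) hbnd' gS
    refine ⟨jS, ?_, ?_⟩
    · intro i j hi hj
      rw [jget i j hi hj]
      by_cases hcond : i ∈ rows ∧ j < (Cn : Int) ∧ 0 ≤ j ∧ pvCell grid i j = "G"
      · rw [if_pos hcond, if_pos ⟨List.mem_cons_of_mem _ hcond.1, hcond.2⟩]
      · rw [if_neg hcond, gget i j hi hj]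
        by_cases hrow0 : i = r0 ∧ j ∈ PySem.List.pyRange 0 (Cn : Int) 1 ∧ pvCell grid r0 j = "G"
        · rw [if_pos hrow0, if_pos ⟨by rw [hrow0.1]; exact List.mem_cons_self,
            (PySem.List.mem_pyRange_one.mp hrow0.2.1).2, (PySem.List.mem_pyRange_one.mp hrow0.2.1).1,
            by rw [hrow0.1]; exact hrow0.2.2⟩]
        · rw [if_neg hrow0, if_neg (by
            rintro ⟨e1, e2, e3, e4⟩
            rcases List.mem_cons.mp e1 with rfl | hmem
            · exact hrow0 ⟨rfl, PySem.List.mem_pyRange_one.mpr ⟨e3, e2⟩, e4⟩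
            · exact hcond ⟨hmem, e2, e3, e4⟩)]
    · rw [jq, gq]
      simp [List.append_assoc]

-- the entries of A's initialized distance matrix (guards already written)
theorem initA_get (grid : List (List String)) (i j : Int) (hi : 0 ≤ i) (hj : 0 ≤ j) :
    pvGetO (pvInitA grid).1 i j =
      if i < (grid.length : Int) ∧ j < (((grid.headD []).length : Nat) : Int) then
        (if pvCell grid i j = "G" then some 0
         else if pvCell grid i j = "W" then some (-1) else none)
      else none := by
  have hfold : pvInitA grid = (PySem.List.pyRange 0 (grid.length : Int) 1).foldl
      (fun s row => (PySem.List.pyRange 0 (((grid.headD []).length : Nat) : Int) 1).foldl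
        (fun s col => if pvCell grid row col = "G" then
          (pvMSet s.1 row col (some 0), s.2 ++ [(row, col)]) else s) s)
      (pvDist0A grid, ([] : List (Int × Int))) := rfl
  obtain ⟨gS, gget, gq⟩ := guardfold grid grid.length (grid.headD []).length
    (PySem.List.pyRange 0 (grid.length : Int) 1) (pvDist0A grid, [])
    (fun x hx => by
      have := PySem.List.mem_pyRange_one.mp hx
      exact ⟨this.1, this.2⟩) (dist0A_shape grid)
  rw [hfold, gget i j hi hj]
  by_cases hin : i < (grid.length : Int) ∧ j < ((grid.headD []).length : Int)
  · by_cases hG : pvCell grid i j = "G"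
    · have hc : i ∈ PySem.List.pyRange 0 (grid.length : Int) 1 ∧
          j < ((grid.headD []).length : Int) ∧ 0 ≤ j ∧ pvCell grid i j = "G" :=
        ⟨PySem.List.mem_pyRange_one.mpr ⟨hi, hin.1⟩, hin.2, hj, hG⟩
      rw [if_pos hc, if_pos hin, if_pos hG]
    · have hc : ¬(i ∈ PySem.List.pyRange 0 (grid.length : Int) 1 ∧
          j < ((grid.headD []).length : Int) ∧ 0 ≤ j ∧ pvCell grid i j = "G") := fun hc => hG hc.2.2.2
      rw [if_neg hc, d0A_get grid i j hi hj, if_pos hin, if_pos hin, if_neg hG]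
  · have hc : ¬(i ∈ PySem.List.pyRange 0 (grid.length : Int) 1 ∧
        j < ((grid.headD []).length : Int) ∧ 0 ≤ j ∧ pvCell grid i j = "G") :=
      fun hc => hin ⟨(PySem.List.mem_pyRange_one.mp hc.1).2, hc.2.1⟩
    rw [if_neg hc, d0A_get grid i j hi hj, if_neg hin, if_neg hin]

theorem initA_shape (grid : List (List String)) :
    ShapeM (pvInitA grid).1 grid.length (grid.headD []).length := by
  obtain ⟨gS, _, _⟩ := guardfold grid grid.length (grid.headD []).length
    (PySem.List.pyRange 0 (grid.length : Int) 1) (pvDist0A grid, [])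
    (fun x hx => by
      have := PySem.List.mem_pyRange_one.mp hx
      exact ⟨this.1, this.2⟩) (dist0A_shape grid)
  exact gS

-- frontier, as produced by the guard loop
def pvFrontier0 (grid : List (List String)) : List (Int × Int) :=
  (PySem.List.pyRange 0 (grid.length : Int) 1).flatMap (fun r =>
    ((PySem.List.pyRange 0 ((grid.headD []).length : Int) 1).filter
        (fun c => decide (pvCell grid r c = "G"))).map (fun c => (r, c)))

theorem initA_queue (grid : List (List String)) : (pvInitA grid).2 = pvFrontier0 grid := by
  obtain ⟨_, _, gq⟩ := guardfold grid grid.length (grid.headD []).length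
    (PySem.List.pyRange 0 (grid.length : Int) 1) (pvDist0A grid, [])
    (fun x hx => by
      have := PySem.List.mem_pyRange_one.mp hx
      exact ⟨this.1, this.2⟩) (dist0A_shape grid)
  unfold pvInitA pvFrontier0
  rw [gq]
  simp

theorem mem_frontier0 (grid : List (List String)) (p : Int × Int) :
    p ∈ pvFrontier0 grid ↔
      (0 ≤ p.1 ∧ p.1 < (grid.length : Int) ∧ 0 ≤ p.2 ∧ p.2 < ((grid.headD []).length : Int) ∧
        pvCell grid p.1 p.2 = "G") := by
  obtain ⟨a, b⟩ := p
  unfold pvFrontier0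
  simp only [List.mem_flatMap, List.mem_map, List.mem_filter, PySem.List.mem_pyRange_one]
  constructor
  · rintro ⟨r, ⟨hr0, hrR⟩, c, ⟨⟨hc0, hcC⟩, hG⟩, heq⟩
    cases heq
    exact ⟨hr0, hrR, hc0, hcC, by simpa using hG⟩
  · rintro ⟨h1, h2, h3, h4, h5⟩
    exact ⟨a, ⟨h1, h2⟩, b, ⟨⟨h3, h4⟩, by simpa using h5⟩, rfl⟩

theorem frontier0_len (grid : List (List String)) :
    (pvFrontier0 grid).length ≤ grid.length * (grid.headD []).length := by
  unfold pvFrontier0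
  rw [List.length_flatMap]
  have h : ((PySem.List.pyRange 0 (grid.length : Int) 1).map (fun r =>
      (((PySem.List.pyRange 0 ((grid.headD []).length : Int) 1).filter
        (fun c' => decide (pvCell grid r c' = "G"))).map (fun c' => (r, c'))).length)).sum ≤
      ((PySem.List.pyRange 0 (grid.length : Int) 1).map (fun r =>
      (((PySem.List.pyRange 0 ((grid.headD []).length : Int) 1).filter
        (fun c' => decide (pvCell grid r c' = "G"))).map (fun c' => (r, c'))).length)).length •
        (grid.headD []).length := by
    apply List.sum_le_card_nsmul
    intro x hx
    obtain ⟨r, _, rfl⟩ := List.mem_map.mp hx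
    rw [List.length_map]
    exact le_trans (List.length_filter_le _ _)
      (le_of_eq (by simp [PySem.List.length_pyRange_one]))
  simpa [PySem.List.length_pyRange_one, smul_eq_mul] using h

-- entries and shape of B's initial matrix
theorem initB_get (grid : List (List String)) (i j : Int) (hi : 0 ≤ i) (hj : 0 ≤ j) :
    pvGetO (pvInitB grid) i j =
      if i < (grid.length : Int) ∧ j < ((grid.headD []).length : Int) then
        (if pvCell grid i j = "G" then some 0
         else if pvCell grid i j = "W" then some (-1) else none)
      else none := by
  rw [pvGetO_nonneg _ _ _ hi hj]
  unfold pvInitB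
  by_cases hiR : i < (grid.length : Int)
  · have h1 : i.toNat < grid.length := by omega
    rw [PySem.List.getElem?_map_pyRange_zero _ _ _ h1]
    simp only [Option.getD_some]
    have hci : ((i.toNat : Int)) = i := by omega
    rw [hci]
    by_cases hjC : j < ((grid.headD []).length : Int)
    · have h2 : j.toNat < (grid.headD []).length := by omega
      rw [PySem.List.getElem?_map_pyRange_zero _ _ _ h2]
      have hin' : i < (grid.length : Int) ∧ j < ((grid.headD []).length : Int) := ⟨hiR, hjC⟩
      have hcj : ((j.toNat : Int)) = j := by omega
      simp only [Option.getD_some]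
      rw [hcj, if_pos hin']
    · rw [List.getElem?_eq_none
        (by simp only [List.length_map, PySem.List.length_pyRange_one]; omega)]
      rw [if_neg (fun hc => hjC hc.2)]
      rfl
  · have hrow : ((PySem.List.pyRange 0 (grid.length : Int) 1).map (fun r =>
        (PySem.List.pyRange 0 ((grid.headD []).length : Int) 1).map (fun c =>
          if pvCell grid r c = "G" then some (0 : Int)
          else if pvCell grid r c = "W" then some (-1 : Int) else none)))[i.toNat]? =
        (none : Option (List (Option Int))) :=
      List.getElem?_eq_none (by rw [List.length_map, PySem.List.length_pyRange_one]; omega)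
    rw [hrow, if_neg (fun hc => hiR hc.1)]
    rfl

theorem initB_shape (grid : List (List String)) :
    ShapeM (pvInitB grid) grid.length (grid.headD []).length := by
  constructor
  · simp [pvInitB, PySem.List.length_pyRange_one]
  · intro row hrow
    obtain ⟨r, _, rfl⟩ := List.mem_map.mp hrow
    simp [PySem.List.length_pyRange_one]

-- matrix extensionality through the entry view
theorem matEqO (a b : List (List (Option Int))) (Rn Cn : Nat)
    (hSa : ShapeM a Rn Cn) (hSb : ShapeM b Rn Cn)
    (h : ∀ i j : Int, 0 ≤ i → i < (Rn : Int) → 0 ≤ j → j < (Cn : Int) →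
      pvGetO a i j = pvGetO b i j) : a = b := by
  obtain ⟨ha1, ha2⟩ := hSa
  obtain ⟨hb1, hb2⟩ := hSb
  apply List.ext_getElem?
  intro i
  by_cases hiR : i < Rn
  · have hia : i < a.length := by omega
    have hib : i < b.length := by omega
    rw [List.getElem?_eq_getElem hia, List.getElem?_eq_getElem hib]
    congr 1
    apply List.ext_getElem?
    intro j
    have hla : a[i].length = Cn := ha2 _ (List.getElem_mem hia)
    have hlb : b[i].length = Cn := hb2 _ (List.getElem_mem hib)
    by_cases hjC : j < Cn
    · have hent := h (i : Int) (j : Int) (by positivity) (by exact_mod_cast hiR)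
        (by positivity) (by exact_mod_cast hjC)
      rw [pvGetO_nonneg _ _ _ (by positivity) (by positivity),
        pvGetO_nonneg _ _ _ (by positivity) (by positivity)] at hent
      simp only [Int.toNat_natCast] at hent
      rw [List.getElem?_eq_getElem hia, List.getElem?_eq_getElem hib] at hent
      simp only [Option.getD_some] at hent
      rw [List.getElem?_eq_getElem (by omega : j < a[i].length),
        List.getElem?_eq_getElem (by omega : j < b[i].length)] at hent ⊢
      simpa using hent
    · rw [List.getElem?_eq_none (by omega), List.getElem?_eq_none (by omega)]
  · rw [List.getElem?_eq_none (by omega), List.getElem?_eq_none (by omega)]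

theorem init_eq (grid : List (List String)) : (pvInitA grid).1 = pvInitB grid := by
  apply matEqO _ _ grid.length (grid.headD []).length (initA_shape grid) (initB_shape grid)
  intro i j hi hiR hj hjC
  rw [initA_get grid i j hi hj, initB_get grid i j hi hj]

theorem VB_init (grid : List (List String)) :
    VB grid grid.length (grid.headD []).length (pvInitB grid) := by
  intro r c hr0 hrR hc0 hcC
  have hget := initB_get grid r c hr0 hc0
  rw [if_pos ⟨hrR, hcC⟩] at hget
  refine ⟨fun hW => ?_, fun hG => ?_, fun hW hG => ?_⟩
  · rw [hget, if_neg (by rw [hW]; decide), if_pos hW]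
  · rw [hget, if_pos hG]
  · rw [hget, if_neg hG, if_neg hW]
    exact Or.inl rfl

theorem Q1_init (grid : List (List String)) :
    Q1 grid (grid.length : Int) ((grid.headD []).length : Int) (pvFrontier0 grid) := by
  intro p hp
  obtain ⟨h1, h2, h3, h4, h5⟩ := (mem_frontier0 grid p).mp hp
  exact ⟨⟨h1, h2, h3, h4⟩, Or.inl h5⟩

theorem Q2_init (grid : List (List String)) :
    Q2 grid (grid.length : Int) ((grid.headD []).length : Int) (pvInitB grid)
      (pvFrontier0 grid) := by
  intro b1 b2 g1 g2 g3 g4 gGO v hv hnin dir hdm k1 k2 k3 k4 kO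
  rcases gGO with hG | hO
  · exact absurd ((mem_frontier0 grid (b1, b2)).mpr ⟨g1, g2, g3, g4, hG⟩) hnin
  · have hget := initB_get grid b1 b2 g1 g3
    rw [if_pos ⟨g2, g4⟩, if_neg (by rw [hO]; decide), if_neg (by rw [hO]; decide)] at hget
    rw [hget] at hv
    simp at hv

theorem phi_init_le (grid : List (List String)) :
    phiM (grid.length * (grid.headD []).length) (pvInitB grid) ≤
      grid.length * ((grid.headD []).length *
        (grid.length * (grid.headD []).length + 2)) := by
  unfold phiM pvInitB
  set N := grid.length * (grid.headD []).length with hN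
  have hrow : ∀ r : Int,
      (((PySem.List.pyRange 0 ((grid.headD []).length : Int) 1).map (fun c =>
        if pvCell grid r c = "G" then some (0 : Int)
        else if pvCell grid r c = "W" then some (-1 : Int) else none)).map (psi N)).sum ≤
      (grid.headD []).length * (N + 2) := by
    intro r
    have h := List.sum_le_card_nsmul
      (((PySem.List.pyRange 0 ((grid.headD []).length : Int) 1).map (fun c =>
        if pvCell grid r c = "G" then some (0 : Int)
        else if pvCell grid r c = "W" then some (-1 : Int) else none)).map (psi N)) (N + 2) ?_
    · simpa [PySem.List.length_pyRange_one, smul_eq_mul] using h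
    · intro x hx
      obtain ⟨y, hy, rfl⟩ := List.mem_map.mp hx
      obtain ⟨c, _, rfl⟩ := List.mem_map.mp hy
      split_ifs <;> simp [psi]
  have h := List.sum_le_card_nsmul
    (((PySem.List.pyRange 0 (grid.length : Int) 1).map (fun r =>
      (PySem.List.pyRange 0 ((grid.headD []).length : Int) 1).map (fun c =>
        if pvCell grid r c = "G" then some (0 : Int)
        else if pvCell grid r c = "W" then some (-1 : Int) else none))).map
      (fun row => (row.map (psi N)).sum)) ((grid.headD []).length * (N + 2)) ?_
  · simpa [PySem.List.length_pyRange_one, smul_eq_mul, List.map_map, Function.comp] using h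
  · intro x hx
    obtain ⟨row, hrowm, rfl⟩ := List.mem_map.mp hx
    obtain ⟨r, _, rfl⟩ := List.mem_map.mp hrowm
    exact hrow r

-- ---- final assembly ----

theorem main_eq (grid : List (List String)) (hne : grid ≠ []) :
    find_shortest_distance_from_a_guard grid = find_shortest_distance_from_a_guard_alt grid := by
  set Rn := grid.length with hRn
  set Cn := (grid.headD []).length with hCn
  set N := Rn * Cn with hNdef
  have hAr := bfsA_run grid Rn Cn (N * (N + 3) + 1) (pvInitB grid) (pvFrontier0 grid)
    (initB_shape grid) (VB_init grid) (Q1_init grid) (Q2_init grid) ?hfuelA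
  case hfuelA =>
    have h1 := frontier0_len grid
    have h2 := phi_init_le grid
    rw [← hRn, ← hCn] at h1 h2
    have h3 : N + N * (N + 2) = N * (N + 3) := by ring
    have h4 : Rn * (Cn * (Rn * Cn + 2)) = N * (N + 2) := by rw [hNdef]; ring
    have h5 : Rn * Cn = N := hNdef.symm
    omega
  have hBr := loopB_run grid Rn Cn (N * (N + 2) + 2) (pvInitB grid)
    (initB_shape grid) (VB_init grid) ?hfuelB
  case hfuelB =>
    have h2 := phi_init_le grid
    rw [← hRn, ← hCn] at h2
    have h4 : Rn * (Cn * (Rn * Cn + 2)) = N * (N + 2) := by rw [hNdef]; ring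
    omega
  obtain ⟨aS, aFix, aPLe, aX⟩ := hAr
  obtain ⟨bS, bFix, bPLe, bX⟩ := hBr
  have hFD : PLe (pvLoopB grid (Rn : Int) (Cn : Int) (N * (N + 2) + 2) (pvInitB grid))
      (pvBfsA grid (Rn : Int) (Cn : Int) (N * (N + 3) + 1) (pvInitB grid) (pvFrontier0 grid)) :=
    aX _ bFix bPLe
  have hDF : PLe (pvBfsA grid (Rn : Int) (Cn : Int) (N * (N + 3) + 1) (pvInitB grid)
      (pvFrontier0 grid)) (pvLoopB grid (Rn : Int) (Cn : Int) (N * (N + 2) + 2) (pvInitB grid)) :=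
    bX _ aFix aPLe
  have hEq : pvBfsA grid (Rn : Int) (Cn : Int) (N * (N + 3) + 1) (pvInitB grid)
      (pvFrontier0 grid) = pvLoopB grid (Rn : Int) (Cn : Int) (N * (N + 2) + 2) (pvInitB grid) := by
    apply matEqO _ _ Rn Cn aS bS
    intro i j hi hiR hj hjC
    exact leO_antisymm (hDF i j hi hj) (hFD i j hi hj)
  unfold find_shortest_distance_from_a_guard find_shortest_distance_from_a_guard_alt
  rw [if_neg hne, if_neg hne]
  have hfun : (fun v => match v with | none => (-1 : Int) | some x => x) =
      (fun v : Option Int => v.getD (-1)) := by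
    funext v; cases v <;> rfl
  rw [hfun, init_eq, initA_queue]
  rw [show grid.length * (grid.headD []).length * (grid.length * (grid.headD []).length + 3) + 1 =
    N * (N + 3) + 1 by rw [hNdef, hRn, hCn]]
  rw [show grid.length * (grid.headD []).length * (grid.length * (grid.headD []).length + 2) + 2 =
    N * (N + 2) + 2 by rw [hNdef, hRn, hCn]]
  rw [hEq]

-- ===== VERDICT (by name: the statement is the Claim_ definition above) =====
theorem find_shortest_distance_from_a_guard_spec : Claim_equal_find_shortest_distance_from_a_guard := by
  intro grid _ _
  unfold Spec_find_shortest_distance_from_a_guard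
  by_cases hnil : grid = []
  · simp [find_shortest_distance_from_a_guard, find_shortest_distance_from_a_guard_alt, hnil]
  · exact main_eq grid hnil
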